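-- pv_equiv track=rewrite | github.com/LGDiMaggio/machina | src/machina/connectors/iot/mqtt.py | _mqtt_topic_matches
-- ===== SOURCE A (Python) =====
-- def _mqtt_topic_matches(pattern: str, topic: str) -> bool:
--     """Check if an MQTT topic matches a subscription pattern.
--
--     Supports ``+`` (single-level) and ``#`` (multi-level) wildcards.
--
--     Args:
--         pattern: MQTT subscription filter.
--         topic: Actual topic to test.
--
--     Returns:
--         ``True`` if the topic matches the pattern.
--     """
--     pattern_parts = pattern.split("/")
--     topic_parts = topic.split("/")
--
--     for i, p in enumerate(pattern_parts):
--         if p == "#":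
--             return True
--         if i >= len(topic_parts):
--             return False
--         if p != "+" and p != topic_parts[i]:
--             return False
--
--     return len(pattern_parts) == len(topic_parts)
-- ===== SOURCE B (Python) =====
-- def _mqtt_topic_matches(pattern: str, topic: str) -> bool:
--     """Check if an MQTT topic matches a subscription pattern ('+'/'#' wildcards)."""
--
--     def match(pp, tp):
--         if not pp:
--             return not tp
--         head, rest = pp[0], pp[1:]
--         if head == "#":
--             return True
--         if not tp:
--             return False
--         return (head == "+" or head == tp[0]) and match(rest, tp[1:])
--
--     return match(pattern.split("/"), topic.split("/"))
-- ===== Notes on version B (the rewrite author's own statement) =====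
-- stated objective: simpler
-- what changed: Replaces A's indexed loop with early returns and a trailing length comparison by a pure recursive descent on the two segment lists: each case is one boolean expression, and the end-of-input cases subsume the length check.
import Mathlib
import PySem

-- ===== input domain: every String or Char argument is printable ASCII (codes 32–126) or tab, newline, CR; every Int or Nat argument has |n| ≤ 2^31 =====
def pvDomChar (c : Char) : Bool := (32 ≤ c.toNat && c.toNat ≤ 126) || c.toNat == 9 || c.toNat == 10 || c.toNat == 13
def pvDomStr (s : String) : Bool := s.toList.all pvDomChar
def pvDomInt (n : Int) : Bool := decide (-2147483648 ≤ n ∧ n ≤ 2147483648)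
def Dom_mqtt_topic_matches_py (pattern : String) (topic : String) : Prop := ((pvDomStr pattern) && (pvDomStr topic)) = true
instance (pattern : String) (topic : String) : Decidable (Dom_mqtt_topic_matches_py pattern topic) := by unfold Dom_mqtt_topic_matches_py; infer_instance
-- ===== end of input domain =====

-- B replaces A's indexed early-return loop (with its trailing length comparison) by a
-- pure recursive descent on the two segment lists (simpler decomposition, same cost).

-- ===== PORT A =====
-- the for-loop over enumerate(pattern_parts): some b = an early return, none = loop fell through
def pvScanA (tp : List String) : Nat → List String → Option Bool
  | _, [] => none
  | i, p :: rest =>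
    if p == "#" then some true
    else if tp.length ≤ i then some false
    else if p != "+" && p != tp.getD i "" then some false
    else pvScanA tp (i + 1) rest

def mqtt_topic_matches_py (pattern : String) (topic : String) : Bool :=
  let pattern_parts := (PySem.Str.split? pattern "/").getD []
  let topic_parts := (PySem.Str.split? topic "/").getD []
  match pvScanA topic_parts 0 pattern_parts with
  | some b => b
  | none => pattern_parts.length == topic_parts.length

-- ===== PORT B =====
-- B's inner recursive helper `match`, structural recursion on the two lists
def pvMatchRec : List String → List String → Bool
  | [], tp => tp.isEmpty
  | head :: rest, tp =>
    if head == "#" then true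
    else
      match tp with
      | [] => false
      | t :: ts => (head == "+" || head == t) && pvMatchRec rest ts

def mqtt_topic_matches_py_alt (pattern : String) (topic : String) : Bool :=
  pvMatchRec ((PySem.Str.split? pattern "/").getD []) ((PySem.Str.split? topic "/").getD [])

-- ===== PRECONDITION & SPEC =====
def Spec_mqtt_topic_matches_py (pattern : String) (topic : String) (out : Bool) : Prop := out = mqtt_topic_matches_py_alt pattern topic
instance (pattern : String) (topic : String) (out : Bool) : Decidable (Spec_mqtt_topic_matches_py pattern topic out) := by unfold Spec_mqtt_topic_matches_py; infer_instance

-- ===== CLAIM =====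
def Claim_equal_mqtt_topic_matches_py : Prop := ∀ (pattern : String) (topic : String), Dom_mqtt_topic_matches_py pattern topic → Spec_mqtt_topic_matches_py pattern topic (mqtt_topic_matches_py pattern topic)

-- ===== LEMMAS AND PROOFS =====

lemma pvScan_eq (pp : List String) : ∀ (tp : List String) (i : Nat), i ≤ tp.length →
    (match pvScanA tp i pp with
     | some b => b
     | none => pp.length + i == tp.length) = pvMatchRec pp (tp.drop i) := by
  induction pp with
  | nil =>
    intro tp i hi
    simp only [pvScanA, pvMatchRec]
    have hlen : (tp.drop i).length = tp.length - i := List.length_drop ..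
    by_cases h : i = tp.length
    · have : tp.drop i = [] := by
        apply List.eq_nil_of_length_eq_zero; omega
      simp [h]
    · have e1 : (i == tp.length) = false := by simp; omega
      have hne : tp.drop i ≠ [] := by
        intro h'
        have := congrArg List.length h'
        simp only [hlen, List.length_nil] at this
        omega
      have e2 : (tp.drop i).isEmpty = false := by
        cases h' : tp.drop i with
        | nil => exact absurd h' hne
        | cons a l => rfl
      simp [e1, e2]
  | cons p rest ih =>
    intro tp i hi
    by_cases hsharp : (p == "#") = true
    · simp [pvScanA, pvMatchRec, hsharp]
    · have hbe : (p == "#") = false := by simpa using hsharp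
      by_cases hib : tp.length ≤ i
      · have hieq : i = tp.length := le_antisymm hi hib
        have hdrop : tp.drop i = [] := by simp [hieq]
        simp [pvScanA, pvMatchRec, hbe, hib, hdrop]
      · have hlt : i < tp.length := by omega
        have hdrop : tp.drop i = tp[i] :: tp.drop (i + 1) :=
          (List.getElem_cons_drop hlt).symm
        have hget : tp.getD i "" = tp[i] := by
          simp [List.getD, List.getElem?_eq_getElem hlt]
        have hdm : (p != "+" && p != tp.getD i "") = !(p == "+" || p == tp[i]) := by
          rw [hget]; simp [bne]
        by_cases hcond : (p != "+" && p != tp.getD i "") = true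
        · have hpm : (p == "+" || p == tp[i]) = false := by
            rw [hdm] at hcond; simpa using hcond
          simp only [pvScanA, hbe, Bool.false_eq_true, if_false, if_neg hib, hcond,
            if_pos trivial, hdrop, pvMatchRec, hpm, Bool.false_and]
        · have hc : (p != "+" && p != tp.getD i "") = false := by simpa using hcond
          have hpm : (p == "+" || p == tp[i]) = true := by
            rw [hdm] at hc
            revert hc
            cases (p == "+" || p == tp[i]) <;> simp
          simp only [pvScanA, hbe, Bool.false_eq_true, if_false, if_neg hib, hc,
            if_false, hdrop, pvMatchRec, hpm, Bool.true_and]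
          have := ih tp (i + 1) (by omega)
          simpa [Nat.add_assoc, Nat.add_comm 1 i] using this

-- ===== VERDICT =====
theorem mqtt_topic_matches_py_spec : Claim_equal_mqtt_topic_matches_py := by
  intro pattern topic _
  unfold Spec_mqtt_topic_matches_py mqtt_topic_matches_py mqtt_topic_matches_py_alt
  have h := pvScan_eq ((PySem.Str.split? pattern "/").getD [])
    ((PySem.Str.split? topic "/").getD []) 0 (Nat.zero_le _)
  simpa using h
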